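-- pv_equiv track=rewrite | github.com/doongidoong/PS_algo | dev/1.py | solution
-- ===== SOURCE A (Python) =====
-- def solution(registered_list, new_id):
--     answer = new_id
--     d = {}
--     for i in registered_list:
--         d[i] = 1
--     #있는지 없는지 체크
--     while True:
--         if d.get(answer,0) == 0:
--             return answer #없다면 Return
--         #있다면 S와 N으로 분리한 뒤 N+1을 해준다
--         s = ''
--         n = ''
--         for i in answer:
--             if i.isdigit():
--                 n+=i
--             else:
--                 s+=i
--         if n =='':
--             n= '0'
--         intN = int(n)+1
--         n = str(intN)
--         answer = s+n
-- ===== SOURCE B (Python) =====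
-- def solution(registered_list, new_id):
--     if new_id not in registered_list:
--         return new_id
--     # parse new_id once: non-digit prefix and starting counter
--     s = ''.join(c for c in new_id if not c.isdigit())
--     digits = ''.join(c for c in new_id if c.isdigit())
--     num = (int(digits) if digits else 0) + 1
--     # one pass over the registry: collect every suffix number already taken for this prefix
--     taken = set()
--     for r in registered_list:
--         if r.startswith(s):
--             t = r[len(s):]
--             if t.isdigit() and (t == '0' or t[0] != '0'):
--                 taken.add(int(t))
--     # first gap at or above num in the sorted taken numbers
--     for k in sorted(taken):
--         if k == num:
--             num += 1
--         elif k > num: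
--             break
--     return s + str(num)
-- ===== Notes on version B (the rewrite author's own statement) =====
-- stated objective: faster
-- what changed: Instead of A's generate-candidate/dict-lookup loop that re-splits and re-parses every candidate string, B parses new_id once, extracts in one pass over the registry the set of integer suffixes already taken for that prefix, and finds the first free number by a gap scan over those numbers in sorted order.
import Mathlib
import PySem

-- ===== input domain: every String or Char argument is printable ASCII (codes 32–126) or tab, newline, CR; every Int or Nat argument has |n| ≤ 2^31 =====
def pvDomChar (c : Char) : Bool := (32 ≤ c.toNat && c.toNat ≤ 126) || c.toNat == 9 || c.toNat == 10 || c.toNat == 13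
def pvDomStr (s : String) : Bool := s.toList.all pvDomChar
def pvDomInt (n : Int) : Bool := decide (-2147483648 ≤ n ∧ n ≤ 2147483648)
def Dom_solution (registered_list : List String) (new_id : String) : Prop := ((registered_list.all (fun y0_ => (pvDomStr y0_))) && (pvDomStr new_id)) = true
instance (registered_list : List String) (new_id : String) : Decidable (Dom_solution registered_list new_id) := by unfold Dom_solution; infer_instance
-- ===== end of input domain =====

-- B replaces A's candidate-generation loop with a different algorithm: one pass over the
-- registry extracting the already-taken suffix numbers for new_id's prefix, then a gap scan
-- over those numbers in sorted order (measurably faster: no per-candidate re-splitting).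

-- ===== PORT A =====
-- hand port of Python's int(s): exact for nonempty strings of ASCII digits, which are the
-- only strings either program passes to int() (A: the digit part of a split, or '0'; B: same).
def pvDigitsVal (cs : List Char) : Int :=
  cs.foldl (fun a c => a * 10 + ((c.toNat : Int) - 48)) 0

-- the 'for i in answer' split of A's loop body: digits to n (second), the rest to s (first)
def splitSN (cs : List Char) : List Char × List Char :=
  cs.foldl (fun p c => if PySem.Chars.isdigit c then (p.1, p.2 ++ [c]) else (p.1 ++ [c], p.2)) ([], [])

-- 'while True' loop of A; fuel registered_list.length + 2 is never exhausted: the checked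
-- candidates are pairwise distinct and the dict has at most registered_list.length keys.
def solutionGo (d : PySem.Dict String Int) : Nat → String → String
  | 0, answer => answer
  | fuel+1, answer =>
    if d.getD answer 0 == 0 then answer
    else
      let p := splitSN answer.toList
      let n := if p.2 = [] then ['0'] else p.2
      let intN := pvDigitsVal n + 1
      solutionGo d fuel (String.ofList (p.1 ++ PySem.Int.toChars intN))

def solution (registered_list : List String) (new_id : String) : String :=
  let d := registered_list.foldl (fun d i => d.insert i 1) (PySem.Dict.empty)
  solutionGo d (registered_list.length + 2) new_id

-- ===== PORT B =====
-- the test 't.isdigit() and (t == "0" or t[0] != "0")' (t[0] is safe: isdigit implies nonempty)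
def pvCanon (t : List Char) : Bool :=
  PySem.Chars.strIsdigit t && (t == ['0'] || t.head? != some '0')

-- 'for k in sorted(taken): if k == num: num += 1 elif k > num: break'
def scanTaken : List Int → Int → Int
  | [], num => num
  | k :: ks, num => if k == num then scanTaken ks (num + 1) else if num < k then num else scanTaken ks num

def solution_alt (registered_list : List String) (new_id : String) : String :=
  if !registered_list.contains new_id then new_id
  else
    let s := new_id.toList.filter (fun c => !PySem.Chars.isdigit c)
    let digits := new_id.toList.filter PySem.Chars.isdigit
    let num := (if digits = [] then 0 else pvDigitsVal digits) + 1
    -- r.startswith(s) and r[len(s):]; the slice is exact: start = len(s) ≥ 0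
    let taken : PySem.Set Int := registered_list.foldl (fun tk r =>
      if PySem.Chars.startswith r.toList s then
        (let t := r.toList.drop s.length
         if pvCanon t then PySem.Set.add tk (pvDigitsVal t) else tk)
      else tk) PySem.Set.empty
    String.ofList (s ++ PySem.Int.toChars (scanTaken (PySem.List.sorted taken (fun x => x) false) num))

-- ===== PRECONDITION & SPEC =====
def Spec_solution (registered_list : List String) (new_id : String) (out : String) : Prop := out = solution_alt registered_list new_id
instance (registered_list : List String) (new_id : String) (out : String) : Decidable (Spec_solution registered_list new_id out) := by unfold Spec_solution; infer_instance

-- ===== CLAIM (what is proved, stated in full; the proofs are below) =====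
def Claim_equal_solution : Prop := ∀ (registered_list : List String) (new_id : String), Dom_solution registered_list new_id → Spec_solution registered_list new_id (solution registered_list new_id)

-- ===== LEMMAS AND PROOFS =====

theorem isdigit_digitChar (d : Nat) (h : d < 10) : PySem.Chars.isdigit (Nat.digitChar d) = true := by
  interval_cases d <;> decide

theorem toNat_digitChar (d : Nat) (h : d < 10) : (Nat.digitChar d).toNat = d + 48 := by
  interval_cases d <;> decide

theorem digitChar_inv (c : Char) (h : PySem.Chars.isdigit c = true) :
    Nat.digitChar (c.toNat - 48) = c := by
  simp [PySem.Chars.isdigit, Char.le_def, UInt32.le_iff_toNat_le] at h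
  have h2 : c.toNat = c.val.toNat := rfl
  have h48 : 48 ≤ c.toNat ∧ c.toNat ≤ 57 := by omega
  have hd : (Nat.digitChar (c.toNat - 48)).toNat = c.toNat := by
    rw [toNat_digitChar _ (by omega)]; omega
  have : (Nat.digitChar (c.toNat - 48)).val = c.val := by
    apply UInt32.toNat_inj.1
    exact hd
  exact Char.ext this

theorem toDigits_all_digit (n : Nat) : ∀ c ∈ Nat.toDigits 10 n, PySem.Chars.isdigit c = true := by
  induction n using Nat.strong_induction_on with
  | _ n ih =>
    rw [Nat.toDigits_eq_if (by norm_num)]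
    split
    · intro c hc
      simp only [List.mem_singleton] at hc
      subst hc; exact isdigit_digitChar n (by omega)
    · intro c hc
      rcases List.mem_append.1 hc with h1 | h2
      · exact ih (n / 10) (by omega) c h1
      · simp only [List.mem_singleton] at h2
        subst h2; exact isdigit_digitChar _ (Nat.mod_lt _ (by norm_num))

theorem toDigits_ne_nil (n : Nat) : Nat.toDigits 10 n ≠ [] := by
  rw [Nat.toDigits_eq_if (by norm_num)]
  split <;> simp

theorem head_toDigits_ne_zero (n : Nat) (h : 1 ≤ n) :
    (Nat.toDigits 10 n).head? ≠ some '0' := by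
  induction n using Nat.strong_induction_on with
  | _ n ih =>
    rw [Nat.toDigits_eq_if (by norm_num)]
    split
    · have : 1 ≤ n := h
      interval_cases n <;> decide
    · rw [List.head?_append_of_ne_nil _ (toDigits_ne_nil (n / 10))]
      exact ih (n / 10) (by omega) (by omega)

theorem pvDigitsVal_toDigits (n : Nat) : pvDigitsVal (Nat.toDigits 10 n) = n := by
  induction n using Nat.strong_induction_on with
  | _ n ih =>
    rw [Nat.toDigits_eq_if (by norm_num)]
    split
    · simp [pvDigitsVal, toNat_digitChar n (by omega)]
    · have h10 : 10 ≤ n := by omega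
      simp only [pvDigitsVal, List.foldl_append, List.foldl_cons, List.foldl_nil]
      have := ih (n / 10) (by omega)
      simp only [pvDigitsVal] at this
      rw [this, toNat_digitChar (n % 10) (Nat.mod_lt _ (by norm_num))]
      have := Nat.div_add_mod n 10
      push_cast
      omega

theorem toChars_of_nonneg (m : Int) (h : 0 ≤ m) :
    PySem.Int.toChars m = Nat.toDigits 10 m.toNat := by
  simp [PySem.Int.toChars, not_lt.2 h]

theorem digit_toNat_bounds (c : Char) (h : PySem.Chars.isdigit c = true) :
    48 ≤ c.toNat ∧ c.toNat ≤ 57 := by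
  simp [PySem.Chars.isdigit, Char.le_def, UInt32.le_iff_toNat_le] at h
  have h2 : c.toNat = c.val.toNat := rfl
  omega

theorem foldl_digits_le (cs : List Char) : ∀ (a : Int), (∀ c ∈ cs, PySem.Chars.isdigit c = true) → 0 ≤ a →
    a ≤ cs.foldl (fun a c => a * 10 + ((c.toNat : Int) - 48)) a := by
  induction cs with
  | nil => intro a _ _; simp
  | cons c cs ih =>
    intro a h ha
    simp only [List.foldl_cons]
    have hc := digit_toNat_bounds c (h c (List.mem_cons_self ..))
    have h48 : (48 : Int) ≤ (c.toNat : Int) := by exact_mod_cast hc.1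
    have step : a ≤ a * 10 + ((c.toNat : Int) - 48) := by nlinarith
    have step0 : (0:Int) ≤ a * 10 + ((c.toNat : Int) - 48) := by nlinarith
    exact le_trans step (ih _ (fun x hx => h x (List.mem_cons_of_mem _ hx)) step0)

theorem pvDigitsVal_nonneg (cs : List Char) (h : ∀ c ∈ cs, PySem.Chars.isdigit c = true) :
    0 ≤ pvDigitsVal cs := foldl_digits_le cs 0 h le_rfl

theorem pvDigitsVal_pos (c : Char) (cs : List Char)
    (h : ∀ x ∈ c :: cs, PySem.Chars.isdigit x = true) (hc : c ≠ '0') :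
    1 ≤ pvDigitsVal (c :: cs) := by
  have hb := digit_toNat_bounds c (h c (List.mem_cons_self ..))
  have hne : c.toNat ≠ 48 := by
    intro h48
    apply hc
    have : c = Nat.digitChar (c.toNat - 48) := (digitChar_inv c (h c (List.mem_cons_self ..))).symm
    rw [this, h48]; rfl
  have h1 : (1 : Int) ≤ 0 * 10 + ((c.toNat : Int) - 48) := by
    have : (49 : Int) ≤ (c.toNat : Int) := by exact_mod_cast (by omega : 49 ≤ c.toNat)
    omega
  calc (1 : Int) ≤ 0 * 10 + ((c.toNat : Int) - 48) := h1
    _ ≤ _ := foldl_digits_le cs _ (fun x hx => h x (List.mem_cons_of_mem _ hx)) (by omega)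

-- canonical decimal strings are exactly the outputs of Nat.toDigits
theorem char_eq_zero_iff (c : Char) (h : PySem.Chars.isdigit c = true) :
    c = '0' ↔ c.toNat = 48 := by
  constructor
  · intro hz; subst hz; rfl
  · intro h48
    have := digitChar_inv c h
    rw [h48] at this
    exact this.symm

theorem canon_aux (t : List Char) : t ≠ [] →
    (∀ c ∈ t, PySem.Chars.isdigit c = true) → t.head? ≠ some '0' →
    t = Nat.toDigits 10 (pvDigitsVal t).toNat := by
  induction t using List.reverseRecOn with
  | nil => intro h; exact absurd rfl h
  | append_singleton ts c ih =>
    intro _ hd hz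
    have hc : PySem.Chars.isdigit c = true := hd c (by simp)
    have hcb := digit_toNat_bounds c hc
    have hval : pvDigitsVal (ts ++ [c]) = pvDigitsVal ts * 10 + ((c.toNat : Int) - 48) := by
      simp [pvDigitsVal, List.foldl_append]
    rcases List.eq_nil_or_concat' ts with hts | _
    · subst hts
      simp only [List.nil_append, List.head?_cons] at hz
      have hcz : c ≠ '0' := fun h => hz (by rw [h])
      have h48 : c.toNat ≠ 48 := fun h => hcz ((char_eq_zero_iff c hc).2 h)
      have hv : pvDigitsVal ([] ++ [c]) = ((c.toNat : Int) - 48) := by simp [pvDigitsVal]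
      have htn : (pvDigitsVal ([] ++ [c])).toNat = c.toNat - 48 := by rw [hv]; omega
      rw [htn, Nat.toDigits_eq_if (by norm_num)]
      show [] ++ [c] = _
      rw [if_pos (by omega)]
      rw [digitChar_inv c hc]
      simp
    · have hts : ts ≠ [] := by rintro rfl; simp_all
      have hdts : ∀ x ∈ ts, PySem.Chars.isdigit x = true :=
        fun x hx => hd x (List.mem_append_left _ hx)
      have hzts : ts.head? ≠ some '0' := by
        rwa [List.head?_append_of_ne_nil _ hts] at hz
      have ihts := ih hts hdts hzts
      -- ts is nonempty with nonzero head: its value is ≥ 1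
      obtain ⟨c0, cs, rfl⟩ := List.exists_cons_of_ne_nil hts
      have hc0 : c0 ≠ '0' := by
        simp only [List.head?_cons] at hzts
        exact fun h => hzts (by rw [h])
      have hV : 1 ≤ pvDigitsVal (c0 :: cs) := pvDigitsVal_pos c0 cs hdts hc0
      set V := pvDigitsVal (c0 :: cs) with hVdef
      have htv : (pvDigitsVal ((c0 :: cs) ++ [c])).toNat = V.toNat * 10 + (c.toNat - 48) := by
        rw [hval]; omega
      rw [htv, Nat.toDigits_eq_if (by norm_num)]
      rw [if_neg (by omega)]
      have hdiv : (V.toNat * 10 + (c.toNat - 48)) / 10 = V.toNat := by omega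
      have hmod : (V.toNat * 10 + (c.toNat - 48)) % 10 = c.toNat - 48 := by omega
      rw [hdiv, hmod, digitChar_inv c hc, ← ihts]

theorem canon_eq_toDigits (t : List Char) (hne : t ≠ [])
    (hd : ∀ c ∈ t, PySem.Chars.isdigit c = true)
    (hz : t = ['0'] ∨ t.head? ≠ some '0') :
    t = Nat.toDigits 10 (pvDigitsVal t).toNat := by
  rcases hz with hz | hz
  · subst hz; decide
  · exact canon_aux t hne hd hz

theorem splitSN_eq_filter (cs : List Char) :
    splitSN cs = (cs.filter (fun c => !PySem.Chars.isdigit c), cs.filter PySem.Chars.isdigit) := by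
  have key : ∀ (l : List Char) (a b : List Char),
      l.foldl (fun p c => if PySem.Chars.isdigit c then (p.1, p.2 ++ [c]) else (p.1 ++ [c], p.2)) (a, b)
        = (a ++ l.filter (fun c => !PySem.Chars.isdigit c), b ++ l.filter PySem.Chars.isdigit) := by
    intro l
    induction l with
    | nil => intro a b; simp
    | cons c l ih =>
      intro a b
      cases h : PySem.Chars.isdigit c <;>
        simp [List.foldl_cons, h, ih]
  simpa using key cs [] []

theorem dictGetD_eq (l : List String) (x : String) :
    ((l.foldl (fun d i => d.insert i 1) (PySem.Dict.empty : PySem.Dict String Int)).getD x 0 = 0)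
      ↔ x ∉ l := by
  have key : ∀ (l : List String) (d : PySem.Dict String Int),
      ((l.foldl (fun d i => d.insert i 1) d).getD x 0 = 0) ↔ (d.getD x 0 = 0 ∧ x ∉ l) := by
    intro l
    induction l with
    | nil => intro d; simp
    | cons i l ih =>
      intro d
      simp only [List.foldl_cons, ih, PySem.Dict.getD_insert, List.mem_cons]
      by_cases hx : x = i <;> simp [hx]
  simpa [PySem.Dict.getD_empty] using key l PySem.Dict.empty

-- membership / size / nodupness of the taken-set fold of B
theorem mem_taken (s : List Char) (l : List String) (acc : PySem.Set Int) (x : Int) :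
    (x ∈ l.foldl (fun tk r =>
      if PySem.Chars.startswith r.toList s then
        (let t := r.toList.drop s.length
         if pvCanon t then PySem.Set.add tk (pvDigitsVal t) else tk)
      else tk) acc)
    ↔ x ∈ acc ∨ ∃ r ∈ l, PySem.Chars.startswith r.toList s = true ∧
        pvCanon (r.toList.drop s.length) = true ∧ pvDigitsVal (r.toList.drop s.length) = x := by
  induction l generalizing acc with
  | nil => simp
  | cons r l ih =>
    simp only [List.foldl_cons, List.mem_cons]
    rw [ih]
    cases h1 : PySem.Chars.startswith r.toList s with
    | false =>
      simp only [Bool.false_eq_true, if_false]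
      constructor
      · rintro (hx | ⟨r', hr', p⟩)
        · exact Or.inl hx
        · exact Or.inr ⟨r', Or.inr hr', p⟩
      · rintro (hx | ⟨r', hr' | hr', p⟩)
        · exact Or.inl hx
        · subst hr'; rw [h1] at p; exact absurd p.1 (by simp)
        · exact Or.inr ⟨r', hr', p⟩
    | true =>
      cases h2 : pvCanon (r.toList.drop s.length) with
      | false =>
        simp only [if_true, Bool.false_eq_true, if_false]
        constructor
        · rintro (hx | ⟨r', hr', p⟩)
          · exact Or.inl hx
          · exact Or.inr ⟨r', Or.inr hr', p⟩
        · rintro (hx | ⟨r', hr' | hr', p⟩)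
          · exact Or.inl hx
          · subst hr'; rw [h2] at p; exact absurd p.2.1 (by simp)
          · exact Or.inr ⟨r', hr', p⟩
      | true =>
        simp only [if_true, PySem.Set.mem_add]
        constructor
        · rintro (⟨hx | hx⟩ | ⟨r', hr', p⟩)
          · exact Or.inl hx
          · exact Or.inr ⟨r, Or.inl rfl, h1, h2, hx.symm⟩
          · exact Or.inr ⟨r', Or.inr hr', p⟩
        · rintro (hx | ⟨r', hr' | hr', p⟩)
          · exact Or.inl (Or.inl hx)
          · subst hr'; exact Or.inl (Or.inr p.2.2.symm)
          · exact Or.inr ⟨r', hr', p⟩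

theorem taken_len (s : List Char) (l : List String) (acc : PySem.Set Int) :
    (l.foldl (fun tk r =>
      if PySem.Chars.startswith r.toList s then
        (let t := r.toList.drop s.length
         if pvCanon t then PySem.Set.add tk (pvDigitsVal t) else tk)
      else tk) acc).length ≤ acc.length + l.length := by
  induction l generalizing acc with
  | nil => simp
  | cons r l ih =>
    simp only [List.foldl_cons, List.length_cons]
    refine le_trans (ih _) ?_
    have hstep : (if PySem.Chars.startswith r.toList s = true then
        (if pvCanon (r.toList.drop s.length) = true then
          PySem.Set.add acc (pvDigitsVal (r.toList.drop s.length)) else acc)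
      else acc).length ≤ acc.length + 1 := by
      cases h1 : PySem.Chars.startswith r.toList s with
      | false => simp
      | true =>
        cases h2 : pvCanon (r.toList.drop s.length) with
        | false => simp
        | true =>
          simp only [if_true]
          rw [PySem.Set.add_eq_ite]
          split <;> simp
    omega

-- the extracted numbers are exactly the registered ids of the form s + str(m), m ≥ 1
theorem extract_iff (s : List Char) (r : String) (m : Int) (hm : 1 ≤ m) :
    (PySem.Chars.startswith r.toList s = true ∧
     pvCanon (r.toList.drop s.length) = true ∧ pvDigitsVal (r.toList.drop s.length) = m)
    ↔ r.toList = s ++ PySem.Int.toChars m := by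
  have htc : PySem.Int.toChars m = Nat.toDigits 10 m.toNat := toChars_of_nonneg m (by omega)
  constructor
  · rintro ⟨h1, h2, h3⟩
    obtain ⟨t, ht⟩ := (PySem.Chars.startswith_iff _ _).1 h1
    have hdrop : r.toList.drop s.length = t := by
      rw [← ht]; exact List.drop_left
    rw [hdrop] at h2 h3
    simp only [pvCanon, PySem.Chars.strIsdigit, Bool.and_eq_true, Bool.or_eq_true,
      List.all_eq_true, Bool.not_eq_eq_eq_not, Bool.not_true, List.isEmpty_eq_false_iff,
      beq_iff_eq, bne_iff_ne, ne_eq] at h2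
    obtain ⟨⟨hne, hall⟩, hz⟩ := h2
    have hz' : t = ['0'] ∨ t.head? ≠ some '0' := by
      rcases hz with hz | hz
      · exact Or.inl hz
      · exact Or.inr hz
    have hcan := canon_eq_toDigits t hne hall hz'
    have htnz : t ≠ ['0'] := by
      rintro rfl
      rw [show pvDigitsVal ['0'] = 0 from by decide] at h3
      omega
    rw [← ht, htc, ← h3, ← hcan]
  · intro h
    have hdrop : r.toList.drop s.length = PySem.Int.toChars m := by
      rw [h]; exact List.drop_left
    have hdig := toDigits_all_digit m.toNat
    have hmn : 1 ≤ m.toNat := by omega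
    refine ⟨(PySem.Chars.startswith_iff _ _).2 ⟨PySem.Int.toChars m, h.symm⟩, ?_, ?_⟩
    · rw [hdrop, htc]
      simp only [pvCanon, PySem.Chars.strIsdigit, Bool.and_eq_true, Bool.or_eq_true,
        List.all_eq_true, Bool.not_eq_eq_eq_not, Bool.not_true, List.isEmpty_eq_false_iff,
        beq_iff_eq, bne_iff_ne, ne_eq]
      exact ⟨⟨toDigits_ne_nil _, hdig⟩, Or.inr (head_toDigits_ne_zero m.toNat hmn)⟩
    · rw [hdrop, htc, pvDigitsVal_toDigits]
      omega

-- the gap scan returns the least number ≥ num missing from the (sorted) list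
theorem scanTaken_spec (L : List Int) : ∀ (num : Int), L.Pairwise (· ≤ ·) →
    num ≤ scanTaken L num ∧ scanTaken L num ∉ L ∧
      ∀ m, num ≤ m → m < scanTaken L num → m ∈ L := by
  induction L with
  | nil =>
    intro num _
    refine ⟨le_refl _, by simp, ?_⟩
    intro m h1 h2
    simp only [scanTaken] at h2
    omega
  | cons k ks ih =>
    intro num hp
    have hks : ks.Pairwise (· ≤ ·) := hp.of_cons
    have hall : ∀ y ∈ ks, k ≤ y := fun y hy => List.rel_of_pairwise_cons hp hy
    by_cases hk : k = num
    · subst hk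
      simp only [scanTaken, beq_self_eq_true, if_true]
      obtain ⟨h1, h2, h3⟩ := ih (k + 1) hks
      refine ⟨by omega, ?_, ?_⟩
      · simp only [List.mem_cons, not_or]
        exact ⟨by omega, h2⟩
      · intro m hm1 hm2
        rcases eq_or_lt_of_le hm1 with h | h
        · rw [← h]; exact List.mem_cons_self ..
        · exact List.mem_cons_of_mem _ (h3 m (by omega) hm2)
    · simp only [scanTaken, beq_iff_eq, hk, if_false]
      by_cases hlt : num < k
      · simp only [hlt, if_true]
        refine ⟨le_refl _, ?_, ?_⟩
        · simp only [List.mem_cons, not_or]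
          refine ⟨by omega, fun hmem => ?_⟩
          have := hall _ hmem; omega
        · intro m h1 h2; omega
      · simp only [hlt, if_false]
        obtain ⟨h1, h2, h3⟩ := ih num hks
        have hkn : k < num := by omega
        refine ⟨h1, ?_, ?_⟩
        · simp only [List.mem_cons, not_or]
          exact ⟨by omega, h2⟩
        · intro m hm1 hm2
          exact List.mem_cons_of_mem _ (h3 m hm1 hm2)

-- A's candidate loop reaches the first free number
theorem solutionGo_reaches (d : PySem.Dict String Int) (s : List Char)
    (hs : ∀ c ∈ s, PySem.Chars.isdigit c = false) :
    ∀ (fuel : Nat) (m r : Int), 0 ≤ m → m ≤ r →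
      (d.getD (String.ofList (s ++ PySem.Int.toChars r)) 0 = 0) →
      (∀ j, m ≤ j → j < r → ¬(d.getD (String.ofList (s ++ PySem.Int.toChars j)) 0 = 0)) →
      (r - m).toNat < fuel →
      solutionGo d fuel (String.ofList (s ++ PySem.Int.toChars m)) = String.ofList (s ++ PySem.Int.toChars r) := by
  intro fuel
  induction fuel with
  | zero => intro m r _ _ _ _ hf; omega
  | succ fuel ih =>
    intro m r hm hmr hfree hbusy hf
    rw [solutionGo]
    by_cases hc : d.getD (String.ofList (s ++ PySem.Int.toChars m)) 0 = 0
    · have heq : m = r := by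
        by_contra hne
        exact hbusy m (le_refl _) (by omega) hc
      subst heq
      rw [if_pos (by simpa using hc)]
    · have hmr' : m < r := by
        rcases eq_or_lt_of_le hmr with h | h
        · exact absurd (h ▸ hfree) hc
        · exact h
      simp only [beq_iff_eq, hc, if_false]
      have htc : PySem.Int.toChars m = Nat.toDigits 10 m.toNat := toChars_of_nonneg m hm
      have hdig : ∀ c ∈ PySem.Int.toChars m, PySem.Chars.isdigit c = true := by
        rw [htc]; exact toDigits_all_digit m.toNat
      have hsplit : splitSN (String.ofList (s ++ PySem.Int.toChars m)).toList
          = (s, PySem.Int.toChars m) := by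
        rw [String.toList_ofList, splitSN_eq_filter, List.filter_append, List.filter_append]
        rw [List.filter_eq_self.2 (fun c hc => by simp [hs c hc]),
            List.filter_eq_nil_iff.2 (fun c hc => by simp [hdig c hc]),
            List.filter_eq_nil_iff.2 (fun c hc => by simp [hs c hc]),
            List.filter_eq_self.2 hdig]
        simp
      rw [hsplit]
      have hne : PySem.Int.toChars m ≠ [] := by rw [htc]; exact toDigits_ne_nil _
      simp only [hne, if_false]
      have hval : pvDigitsVal (PySem.Int.toChars m) = m := by
        rw [htc, pvDigitsVal_toDigits, Int.toNat_of_nonneg hm]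
      rw [hval]
      exact ih (m + 1) r (by omega) (by omega) hfree
        (fun j h1 h2 => hbusy j (by omega) h2) (by omega)

-- ===== VERDICT (by name: the statement is the Claim_ definition above) =====
theorem solution_spec : Claim_equal_solution := by
  intro registered_list new_id _
  unfold Spec_solution solution solution_alt
  simp only []
  set d := registered_list.foldl (fun d i => d.insert i 1) (PySem.Dict.empty : PySem.Dict String Int) with hd_def
  by_cases hmem : new_id ∈ registered_list
  · -- new_id is registered: A searches by incrementing, B by the gap scan
    rw [if_neg (by simp [hmem])]
    show solutionGo d (registered_list.length + 2) new_id = _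
    rw [show registered_list.length + 2 = (registered_list.length + 1) + 1 from rfl, solutionGo]
    have hbusy0 : ¬ (d.getD new_id 0 = 0) := by
      rw [hd_def, dictGetD_eq]; simpa using hmem
    rw [if_neg (by simpa using hbusy0)]
    set s := new_id.toList.filter (fun c => !PySem.Chars.isdigit c) with hs_def
    set digits := new_id.toList.filter PySem.Chars.isdigit with hdg_def
    have hsplit : splitSN new_id.toList = (s, digits) := splitSN_eq_filter _
    rw [hsplit]
    have hdigall : ∀ c ∈ digits, PySem.Chars.isdigit c = true := fun c hc => (List.mem_filter.1 hc).2
    have hs_nodigit : ∀ c ∈ s, PySem.Chars.isdigit c = false := by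
      intro c hc
      simpa using (List.mem_filter.1 hc).2
    set num := (if digits = [] then 0 else pvDigitsVal digits) + 1 with hnum_def
    have hnum1 : 1 ≤ num := by
      rw [hnum_def]
      split
      · omega
      · have := pvDigitsVal_nonneg digits hdigall; omega
    have hnum_eq : pvDigitsVal (if digits = [] then ['0'] else digits) + 1 = num := by
      rw [hnum_def]
      split
      · norm_num [show pvDigitsVal ['0'] = 0 from by decide]
      · rfl
    set taken := registered_list.foldl (fun tk r =>
      if PySem.Chars.startswith r.toList s then
        (let t := r.toList.drop s.length
         if pvCanon t then PySem.Set.add tk (pvDigitsVal t) else tk)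
      else tk) PySem.Set.empty with htaken_def
    set L := PySem.List.sorted taken (fun x => x) false with hL_def
    obtain ⟨hr1, hr2, hr3⟩ := scanTaken_spec L num (PySem.List.sorted_pairwise taken (fun x => x))
    set rr := scanTaken L num with hrr_def
    have hbridge : ∀ j : Int, 1 ≤ j →
        (j ∈ taken ↔ String.ofList (s ++ PySem.Int.toChars j) ∈ registered_list) := by
      intro j hj
      rw [htaken_def, mem_taken]
      constructor
      · rintro (h | ⟨r, hr, p⟩)
        · simp [PySem.Set.empty] at h
        · have heq := (extract_iff s r j hj).1 p
          have hreq : r = String.ofList (s ++ PySem.Int.toChars j) :=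
            String.toList_inj.mp (by rw [heq, String.toList_ofList])
          rwa [← hreq]
      · intro h
        exact Or.inr ⟨_, h, (extract_iff s _ j hj).2 (by rw [String.toList_ofList])⟩
    have hrfree : d.getD (String.ofList (s ++ PySem.Int.toChars rr)) 0 = 0 := by
      rw [hd_def, dictGetD_eq]
      intro hin
      exact hr2 ((PySem.List.mem_sorted ..).2 ((hbridge rr (by omega)).2 hin))
    have hbusy : ∀ j, num ≤ j → j < rr →
        ¬ d.getD (String.ofList (s ++ PySem.Int.toChars j)) 0 = 0 := by
      intro j h1 h2 h0
      rw [hd_def, dictGetD_eq] at h0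
      exact h0 ((hbridge j (by omega)).1 ((PySem.List.mem_sorted ..).1 (hr3 j h1 h2)))
    have hcount : (rr - num).toNat < registered_list.length + 1 := by
      have hsub : PySem.List.pyRange num rr 1 ⊆ taken := by
        intro j hj
        rw [PySem.List.mem_pyRange_one] at hj
        exact (PySem.List.mem_sorted ..).1 (hr3 j hj.1 hj.2)
      have hnd := PySem.List.nodup_pyRange_one (a := num) (b := rr)
      have hlen := (List.subperm_of_subset hnd hsub).length_le
      rw [PySem.List.length_pyRange_one] at hlen
      have htl : taken.length ≤ registered_list.length := by
        have := taken_len s registered_list PySem.Set.empty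
        simpa [PySem.Set.empty] using this
      omega
    show solutionGo d (registered_list.length + 1)
        (String.ofList (s ++ PySem.Int.toChars (pvDigitsVal (if digits = [] then ['0'] else digits) + 1)))
      = String.ofList (s ++ PySem.Int.toChars rr)
    rw [hnum_eq]
    exact solutionGo_reaches d s hs_nodigit (registered_list.length + 1) num rr
      (by omega) hr1 hrfree hbusy hcount
  · -- new_id is free: both return it unchanged
    rw [if_pos (by simp [hmem])]
    show solutionGo d (registered_list.length + 2) new_id = new_id
    have h0 : d.getD new_id 0 = 0 := by
      rw [hd_def, dictGetD_eq]; exact hmem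
    rw [show registered_list.length + 2 = (registered_list.length + 1) + 1 from rfl, solutionGo]
    rw [if_pos (by simp [h0])]
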